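-- pv_equiv track=rewrite | github.com/avishek376/Scaler-Problem-Solving | Intermediate/11 Intermediate DSA: Bit Manipulations - 2/Homework/Q5. Find nth Magic Number /Find nth Magic Number.py | solve
-- ===== SOURCE A (Python) =====
-- def solve(A):
--     pow = 1
--     ans = 0
--     while (A):
--         pow = pow*5
--         # If last bit of n is set
--         if (A & 1) == 1:
--             ans += pow
--         # proceed to next bit
--         A = A >> 1
--     return ans
-- ===== SOURCE B (Python) =====
-- def solve(A):
--     # reinterpret A's binary digit string as a base-5 numeral, shifted once
--     return int(bin(A)[2:], 5) * 5
-- ===== Notes on version B (the rewrite author's own statement) =====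
-- stated objective: idiomatic
-- what changed: Replaced the explicit bit-by-bit loop with running pow/ans accumulators by a one-liner that reads A's binary digit string (bin) and reinterprets it as a base-5 numeral, multiplied by 5.
import Mathlib
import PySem

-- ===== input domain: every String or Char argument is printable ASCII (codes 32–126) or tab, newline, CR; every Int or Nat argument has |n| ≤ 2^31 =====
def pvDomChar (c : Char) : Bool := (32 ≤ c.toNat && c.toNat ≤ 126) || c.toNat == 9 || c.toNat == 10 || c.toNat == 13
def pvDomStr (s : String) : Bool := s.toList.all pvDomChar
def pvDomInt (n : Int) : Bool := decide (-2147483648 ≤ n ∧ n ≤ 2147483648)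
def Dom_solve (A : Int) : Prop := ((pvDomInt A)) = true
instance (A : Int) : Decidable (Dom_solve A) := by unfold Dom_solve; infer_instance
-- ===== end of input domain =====

-- B replaces A's bit loop with pow/ans accumulators by reading A's binary digit
-- string and reinterpreting it as a base-5 numeral, times 5 (objective: idiomatic).

-- ===== PORT A =====
-- the while loop: state (A, pow, ans); Python loops forever for A < 0 (A >> 1
-- stays -1), so the port returns ans there — those inputs are excluded by Pre_.
def solveGo (A pow ans : Int) : Int :=
  if A ≤ 0 then ans
  else
    let pow' := pow * 5
    solveGo (A >>> (1:Nat)) pow' (if PySem.Int.band A 1 = 1 then ans + pow' else ans)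
termination_by A.toNat
decreasing_by
  have h2 : A >>> (1:Nat) = A / 2 := Int.shiftRight_eq_div_pow A 1 
  simp only [h2]
  omega

def solve (A : Int) : Int := solveGo A 1 0

-- ===== PORT B =====
-- bin(n)[2:] as a list of binary digits, most significant first (bin(0) → [0])
def binAux : Nat → List Nat
  | 0 => []
  | n+1 => binAux ((n+1)/2) ++ [(n+1) % 2]

-- int(bin(A)[2:], 5) * 5; for A < 0 Python B raises ValueError (outside Pre_)
def solve_alt (A : Int) : Int :=
  let digits := if A.toNat = 0 then [0] else binAux A.toNat
  ((digits.foldl (fun acc d => acc * 5 + d) 0 : Nat) : Int) * 5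

-- ===== PRECONDITION & SPEC =====
-- Pre_ excludes A < 0: there Python A loops forever (A >> 1 never reaches 0)
-- and Python B raises ValueError.
def Pre_solve (A : Int) : Prop := 0 ≤ A
instance (A : Int) : Decidable (Pre_solve A) := by unfold Pre_solve; infer_instance
def pvWitness_solve : Int := 5
def Spec_solve (A : Int) (out : Int) : Prop := out = solve_alt A
instance (A : Int) (out : Int) : Decidable (Spec_solve A out) := by unfold Spec_solve; infer_instance

-- ===== CLAIM (what is proved, stated in full; the proofs are below) =====
def Claim_equal_solve : Prop := ∀ (A : Int), Dom_solve A → Pre_solve A → Spec_solve A (solve A)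

-- ===== LEMMAS AND PROOFS =====

-- the magic value of n read from its bits, least significant first
def magicVal : Nat → Nat
  | 0 => 0
  | n+1 => ((n+1) % 2) + 5 * magicVal ((n+1)/2)

theorem parse_binAux (n : Nat) :
    (binAux n).foldl (fun acc d => acc * 5 + d) 0 = magicVal n := by
  induction n using Nat.strong_induction_on with
  | _ n ih =>
    match n with
    | 0 => simp [binAux, magicVal]
    | m+1 =>
      rw [binAux, List.foldl_append, ih ((m+1)/2) (by omega)]
      simp [magicVal]; omega

theorem solveGo_eq (n : Nat) : ∀ (pow ans : Int),
    solveGo (n : Int) pow ans = ans + pow * 5 * (magicVal n : Int) := by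
  induction n using Nat.strong_induction_on with
  | _ n ih =>
    intro pow ans
    match n with
    | 0 => rw [solveGo]; simp [magicVal]
    | m+1 =>
      rw [solveGo]
      have hpos : ¬ ((m+1 : Nat) : Int) ≤ 0 := by omega
      have hsh : ((m+1 : Nat) : Int) >>> (1:Nat) = (((m+1)/2 : Nat) : Int) := by
        have h2 : ((m+1 : Nat) : Int) >>> (1:Nat) = ((m+1 : Nat) : Int) / 2 := by
          exact Int.shiftRight_eq_div_pow ((m+1 : Nat) : Int) 1
        rw [h2]; omega
      have hband : PySem.Int.band ((m+1 : Nat) : Int) 1 = (((m+1) % 2 : Nat) : Int) := by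
        simpa [Nat.and_one_is_mod] using PySem.Int.band_natCast (m+1) 1
      simp only [hpos, hsh, hband]
      rw [ih ((m+1)/2) (by omega)]
      have hm : magicVal (m+1) = ((m+1) % 2) + 5 * magicVal ((m+1)/2) := by rw [magicVal]
      rcases Nat.mod_two_eq_zero_or_one (m+1) with h | h <;>
        simp [h, hm] <;> push_cast <;> ring

-- ===== VERDICT (by name: the statement is the Claim_ definition above) =====
theorem solve_spec : Claim_equal_solve := by
  intro A _ hpre
  unfold Pre_solve at hpre
  unfold Spec_solve solve solve_alt
  rw [show A = (A.toNat : Int) by omega, solveGo_eq A.toNat 1 0]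
  simp only [Int.toNat_natCast]
  by_cases h0 : A.toNat = 0
  · simp [h0, magicVal]
  · simp only [h0, if_false, parse_binAux]
    ring
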